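-- pv_equiv track=rewrite | github.com/vit-aborigen/CIO_woplugin | Can Balance.py | can_balance
-- ===== SOURCE A (Python) =====
-- from typing import Iterable
--
-- def can_balance(weights: Iterable) -> int:
--     left, right = [], []
--     weight = lambda x: sum([x[i] * (len(x) - i) for i in range(len(x))])
--     while len(weights) > 1:
--         if weight(left) > weight(right):
--             right.append(weights.pop())
--         else:
--             left.append(weights.pop(0))
--     if weight(left) == weight(right):
--         return len(left)
--     return -1
-- ===== SOURCE B (Python) =====
-- def can_balance(weights):
--     # O(n): two pointers + incremental torque/sum updates (no per-step rescans).
--     # Note: A mutates its argument (pops it down to <=1 element); B does not —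
--     # equivalence is about the return value only.
--     ws = list(weights)
--     i, j = 0, len(ws) - 1
--     l_w = r_w = l_s = r_s = 0   # running torque and element-sum of each side
--     n_left = 0
--     while i < j:
--         if l_w > r_w:
--             r_s += ws[j]
--             r_w += r_s
--             j -= 1
--         else:
--             l_s += ws[i]
--             l_w += l_s
--             i += 1
--             n_left += 1
--     return n_left if l_w == r_w else -1
-- ===== Notes on version B (the rewrite author's own statement) =====
-- stated objective: faster
-- what changed: A rescans and re-sums both halves (the quadratic-cost weight lambda) on every loop iteration and mutates the input via pop(); B keeps two pointers into the untouched list and updates each side's torque and element-sum incrementally in O(1) per step.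
import Mathlib
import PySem

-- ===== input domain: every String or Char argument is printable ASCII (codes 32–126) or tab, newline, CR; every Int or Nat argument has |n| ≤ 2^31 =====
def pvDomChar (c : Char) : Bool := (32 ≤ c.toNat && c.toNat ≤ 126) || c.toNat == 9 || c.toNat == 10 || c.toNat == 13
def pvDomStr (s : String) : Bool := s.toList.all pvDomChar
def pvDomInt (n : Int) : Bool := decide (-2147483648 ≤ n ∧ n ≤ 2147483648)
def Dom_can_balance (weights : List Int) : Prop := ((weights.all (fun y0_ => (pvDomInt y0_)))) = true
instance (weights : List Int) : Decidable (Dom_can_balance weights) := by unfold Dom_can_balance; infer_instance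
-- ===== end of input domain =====

-- B replaces A's per-step rescans of both halves by a two-pointer loop with incremental
-- torque/sum updates (objective: faster). Python A mutates its argument via pop(); B does not —
-- the equivalence proved here is about the return value only.

-- ===== PORT A =====
-- A's `weight` lambda: sum([x[i] * (len(x) - i) for i in range(len(x))]);
-- `getD i 0` is exact here since every i drawn from range(len(x)) is in range.
def pyWeight (x : List Int) : Int :=
  ((List.range x.length).map (fun i => x.getD i 0 * ((x.length : Int) - (i : Int)))).sum

-- A's while-loop over the state (weights, left, right); weights.pop() = getLast!/dropLast and
-- weights.pop(0) = head!/tail are exact under the `length > 1` guard (no IndexError possible).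
-- `fuel` is only a totality device: each iteration shortens ws by one, so fuel = ws.length
-- (as supplied by can_balance) never runs out before the loop guard fails.
def canBalLoopA : Nat → List Int → List Int → List Int → Int
  | fuel + 1, ws, l, r =>
    if ws.length > 1 then
      if pyWeight l > pyWeight r then
        canBalLoopA fuel ws.dropLast l (r ++ [ws.getLast!])
      else
        canBalLoopA fuel ws.tail (l ++ [ws.head!]) r
    else if pyWeight l = pyWeight r then (l.length : Int) else -1
  | 0, _, l, r => if pyWeight l = pyWeight r then (l.length : Int) else -1

def can_balance (weights : List Int) : Int := canBalLoopA weights.length weights [] []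

-- ===== PORT B =====
-- B's while-loop: two pointers i ≤ j into the untouched list, running torques lw/rw and
-- element sums ls/rs, nl = number of elements taken on the left.
-- `getD j.toNat 0` is exact: inside the loop 0 ≤ i < j < len, so both indices are in range.
-- `fuel` is only a totality device: j - i shrinks by one per iteration, so fuel = len never runs out.
def canBalLoopB : Nat → List Int → Int → Int → Int → Int → Int → Int → Int → Int
  | fuel + 1, ws, i, j, lw, rw, ls, rs, nl =>
    if i < j then
      if lw > rw then
        canBalLoopB fuel ws i (j - 1) lw (rw + (rs + ws.getD j.toNat 0)) ls (rs + ws.getD j.toNat 0) nl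
      else
        canBalLoopB fuel ws (i + 1) j (lw + (ls + ws.getD i.toNat 0)) rw (ls + ws.getD i.toNat 0) rs (nl + 1)
    else if lw = rw then nl else -1
  | 0, _, _, _, lw, rw, _, _, nl => if lw = rw then nl else -1

def can_balance_alt (weights : List Int) : Int :=
  canBalLoopB weights.length weights 0 ((weights.length : Int) - 1) 0 0 0 0 0

-- ===== PRECONDITION & SPEC =====
def Spec_can_balance (weights : List Int) (out : Int) : Prop := out = can_balance_alt weights
instance (weights : List Int) (out : Int) : Decidable (Spec_can_balance weights out) := by unfold Spec_can_balance; infer_instance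

-- ===== CLAIM (what is proved, stated in full; the proofs are below) =====
def Claim_equal_can_balance : Prop := ∀ (weights : List Int), Dom_can_balance weights → Spec_can_balance weights (can_balance weights)

-- ===== LEMMAS AND PROOFS =====

-- Common abstraction of both loops: A's loop with the two weights/sums/count carried as scalars.
def loopC : Nat → List Int → Int → Int → Int → Int → Int → Int
  | fuel + 1, ws, lw, rw, ls, rs, nl =>
    if ws.length > 1 then
      if lw > rw then
        loopC fuel ws.dropLast lw (rw + (rs + ws.getLast!)) ls (rs + ws.getLast!) nl
      else
        loopC fuel ws.tail (lw + (ls + ws.head!)) rw (ls + ws.head!) rs (nl + 1)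
    else if lw = rw then nl else -1
  | 0, _, lw, rw, _, _, nl => if lw = rw then nl else -1

lemma pyWeight_nil : pyWeight [] = 0 := rfl

lemma pyWeight_cons (a : Int) (t : List Int) :
    pyWeight (a :: t) = a * ((t.length : Int) + 1) + pyWeight t := by
  unfold pyWeight
  rw [List.length_cons, List.range_succ_eq_map, List.map_cons, List.map_map, List.sum_cons]
  have h2 : List.map ((fun i => (a :: t).getD i 0 * (((t.length + 1 : Nat) : Int) - (i : Int))) ∘
        Nat.succ) (List.range t.length)
      = List.map (fun i => t.getD i 0 * ((t.length : Int) - (i : Int))) (List.range t.length) := by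
    refine List.map_congr_left (fun i _ => ?_)
    simp only [Function.comp_apply, List.getD_cons_succ]
    push_cast
    ring
  rw [h2]
  simp only [List.getD_cons_zero, Nat.cast_zero, sub_zero]
  push_cast
  ring

lemma pyWeight_append (l : List Int) (y : Int) :
    pyWeight (l ++ [y]) = pyWeight l + l.sum + y := by
  induction l with
  | nil =>
      rw [List.nil_append, show [y] = y :: ([] : List Int) from rfl, pyWeight_cons, pyWeight_nil]
      simp
  | cons a t ih =>
      simp only [List.cons_append, pyWeight_cons, ih, List.sum_cons,
        List.length_append, List.length_cons, List.length_nil]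
      push_cast; ring

-- A's loop is loopC with the weights/sums/count of left and right carried explicitly.
lemma loopA_eq_loopC : ∀ (fuel : Nat) (ws l r : List Int),
    canBalLoopA fuel ws l r = loopC fuel ws (pyWeight l) (pyWeight r) l.sum r.sum (l.length : Int) := by
  intro fuel
  induction fuel with
  | zero => intro ws l r; rfl
  | succ n ih =>
      intro ws l r
      rw [canBalLoopA, loopC]
      by_cases h1 : ws.length > 1
      · simp only [if_pos h1]
        by_cases h2 : pyWeight l > pyWeight r
        · simp only [if_pos h2]
          rw [ih ws.dropLast l (r ++ [ws.getLast!])]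
          rw [pyWeight_append, List.sum_append, List.sum_cons, List.sum_nil]
          ring_nf
        · simp only [if_neg h2]
          rw [ih ws.tail (l ++ [ws.head!]) r]
          rw [pyWeight_append, List.sum_append, List.sum_cons, List.sum_nil,
            List.length_append, List.length_cons, List.length_nil]
          push_cast
          ring_nf
      · simp only [if_neg h1]

-- B's loop is loopC on the still-unplaced middle segment ws[i..j] of the list.
lemma loopB_eq_loopC : ∀ (fuel : Nat) (ws : List Int) (i j lw rw ls rs nl : Int),
    0 ≤ i → i ≤ j + 1 → j < (ws.length : Int) →
    canBalLoopB fuel ws i j lw rw ls rs nl =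
      loopC fuel ((ws.drop i.toNat).take (j + 1 - i).toNat) lw rw ls rs nl := by
  intro fuel
  induction fuel with
  | zero => intro ws i j lw rw ls rs nl _ _ _; rfl
  | succ n ih =>
      intro ws i j lw rw ls rs nl h0 h1 h2
      have hseglen : ((ws.drop i.toNat).take (j + 1 - i).toNat).length = (j + 1 - i).toNat := by
        simp only [List.length_take, List.length_drop]
        omega
      rw [canBalLoopB, loopC]
      by_cases hij : i < j
      · have hlen1 : ((ws.drop i.toNat).take (j + 1 - i).toNat).length > 1 := by omega
        simp only [if_pos hij, if_pos hlen1]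
        have hjlt : j.toNat < ws.length := by omega
        have hilt : i.toNat < ws.length := by omega
        by_cases hgt : lw > rw
        · -- take from the right end
          have hlast : ((ws.drop i.toNat).take (j + 1 - i).toNat).getLast! = ws.getD j.toNat 0 := by
            rw [List.getLast!_eq_getLast?_getD, List.getLast?_eq_getElem?, hseglen]
            rw [List.getElem?_take_of_lt (by omega), List.getElem?_drop]
            have : i.toNat + ((j + 1 - i).toNat - 1) = j.toNat := by omega
            rw [this, List.getD_eq_getElem?_getD, List.getElem?_eq_getElem hjlt]
            rfl
          have hdrop : ((ws.drop i.toNat).take (j + 1 - i).toNat).dropLast =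
              (ws.drop i.toNat).take (j - 1 + 1 - i).toNat := by
            rw [List.dropLast_eq_take, hseglen, List.take_take]
            congr 1
            omega
          simp only [if_pos hgt, hlast, hdrop]
          exact ih ws i (j - 1) lw (rw + (rs + ws.getD j.toNat 0)) ls
            (rs + ws.getD j.toNat 0) nl h0 (by omega) (by omega)
        · -- take from the front
          have hcons : (ws.drop i.toNat).take (j + 1 - i).toNat =
              ws[i.toNat] :: ((ws.drop (i + 1).toNat).take (j + 1 - (i + 1)).toNat) := by
            rw [show ((i : Int) + 1).toNat = i.toNat + 1 by omega,
              show (j + 1 - i).toNat = (j + 1 - (i + 1)).toNat + 1 by omega,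
              List.drop_eq_getElem_cons hilt, List.take_succ_cons]
          have hget : ws.getD i.toNat 0 = ws[i.toNat] := by
            rw [List.getD_eq_getElem?_getD, List.getElem?_eq_getElem hilt]; rfl
          simp only [if_neg hgt, hcons, List.head!_cons, List.tail_cons, hget]
          exact ih ws (i + 1) j (lw + (ls + ws[i.toNat])) rw (ls + ws[i.toNat]) rs (nl + 1)
            (by omega) (by omega) h2
      · have hlen1 : ¬ ((ws.drop i.toNat).take (j + 1 - i).toNat).length > 1 := by omega
        simp only [if_neg hij, if_neg hlen1]

lemma can_balance_eq_loopC (w : List Int) : can_balance w = loopC w.length w 0 0 0 0 0 := by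
  unfold can_balance
  rw [loopA_eq_loopC w.length w [] []]
  simp [pyWeight_nil]

lemma can_balance_alt_eq_loopC (w : List Int) : can_balance_alt w = loopC w.length w 0 0 0 0 0 := by
  unfold can_balance_alt
  rw [loopB_eq_loopC w.length w 0 ((w.length : Int) - 1) 0 0 0 0 0
    (by omega) (by omega) (by omega)]
  have : ((w.length : Int) - 1 + 1 - 0).toNat = w.length := by omega
  rw [this]
  simp

-- ===== VERDICT (by name: the statement is the Claim_ definition above) =====
theorem can_balance_spec : Claim_equal_can_balance := by
  intro weights _
  unfold Spec_can_balance
  rw [can_balance_eq_loopC, can_balance_alt_eq_loopC]
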